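-- pv_equiv track=rewrite | github.com/dhruvpd77/attendance_portal | core/exam_admin_analytics.py | _group_mark_columns_single_dept
-- ===== SOURCE A (Python) =====
-- def _group_mark_columns_single_dept(col_phase_subject):
--     """[(phase_name, [subject_name, ...]), ...] in column order."""
--     groups = []
--     i = 0
--     n = len(col_phase_subject)
--     while i < n:
--         pn, sn = col_phase_subject[i]
--         subs = [sn]
--         i += 1
--         while i < n and col_phase_subject[i][0] == pn:
--             subs.append(col_phase_subject[i][1])
--             i += 1
--         groups.append((pn, subs))
--     return groups
-- ===== SOURCE B (Python) =====
-- def _group_mark_columns_single_dept(col_phase_subject):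
--     """[(phase_name, [subject_name, ...]), ...] in column order."""
--     groups = []
--     for pn, sn in reversed(col_phase_subject):
--         if groups and groups[0][0] == pn:
--             groups[0] = (pn, [sn] + groups[0][1])
--         else:
--             groups.insert(0, (pn, [sn]))
--     return groups
-- ===== Notes on version B (the rewrite author's own statement) =====
-- stated objective: alternative
-- what changed: Builds the result back-to-front: iterates the columns in reverse and merges each column into the current first group (or prepends a new group), instead of A's forward index scan with a nested while-loop per run.
import Mathlib
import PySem

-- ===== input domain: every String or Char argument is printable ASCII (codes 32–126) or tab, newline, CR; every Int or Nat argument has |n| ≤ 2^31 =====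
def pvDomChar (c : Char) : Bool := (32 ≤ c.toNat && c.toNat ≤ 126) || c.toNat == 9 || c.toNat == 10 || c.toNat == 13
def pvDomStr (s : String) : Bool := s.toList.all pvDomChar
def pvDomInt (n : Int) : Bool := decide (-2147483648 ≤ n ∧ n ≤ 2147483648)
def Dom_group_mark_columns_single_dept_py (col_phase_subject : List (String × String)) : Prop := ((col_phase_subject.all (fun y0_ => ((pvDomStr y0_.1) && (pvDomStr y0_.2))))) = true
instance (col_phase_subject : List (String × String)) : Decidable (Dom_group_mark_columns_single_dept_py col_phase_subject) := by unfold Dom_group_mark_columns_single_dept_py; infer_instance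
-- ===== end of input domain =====

-- B builds the result back-to-front: it iterates the columns in reverse and merges each
-- column into the current first group (or prepends a new one), instead of A's forward
-- index scan with a nested while-loop per run (same result, different traversal; not faster).

-- ===== PORT A =====
-- A's nested while-loops, transliterated with an explicit index; the Nat fuel arguments
-- (initialised to the list length) only make the recursion structural: the loops stop on
-- the same `i < n` / phase-name tests as the Python, and the fuel is never exhausted.
def aCollect : Nat → List (String × String) → String → List String → Nat → List String × Nat
  | 0, _, _, subs, i => (subs, i)
  | fuel + 1, l, pn, subs, i =>
    if i < l.length && ((l.getD i ("", "")).1 == pn) then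
      aCollect fuel l pn (subs ++ [(l.getD i ("", "")).2]) (i + 1)
    else (subs, i)

def aLoop : Nat → List (String × String) → Nat → List (String × List String)
  | 0, _, _ => []
  | fuel + 1, l, i =>
    if i < l.length then
      let c := l.getD i ("", "")
      let r := aCollect l.length l c.1 [c.2] (i + 1)
      (c.1, r.1) :: aLoop fuel l r.2
    else []

def group_mark_columns_single_dept_py (col_phase_subject : List (String × String)) : List (String × List String) :=
  aLoop col_phase_subject.length col_phase_subject 0

-- ===== PORT B =====
-- port of B: Python's `for pn, sn in reversed(col): merge into groups[0] or insert(0, …)`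
-- is exactly a right fold with this step function over the list.
def bStep (x : String × String) (groups : List (String × List String)) : List (String × List String) :=
  match groups with
  | (qn, subs) :: rest =>
    if qn == x.1 then (x.1, x.2 :: subs) :: rest
    else (x.1, [x.2]) :: (qn, subs) :: rest
  | [] => [(x.1, [x.2])]

def group_mark_columns_single_dept_py_alt (col_phase_subject : List (String × String)) : List (String × List String) :=
  col_phase_subject.foldr bStep []

-- ===== PRECONDITION & SPEC =====
def Spec_group_mark_columns_single_dept_py (col_phase_subject : List (String × String)) (out : List (String × List String)) : Prop := out = group_mark_columns_single_dept_py_alt col_phase_subject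
instance (col_phase_subject : List (String × String)) (out : List (String × List String)) : Decidable (Spec_group_mark_columns_single_dept_py col_phase_subject out) := by unfold Spec_group_mark_columns_single_dept_py; infer_instance

-- ===== CLAIM (what is proved, stated in full; the proofs are below) =====
def Claim_equal_group_mark_columns_single_dept_py : Prop := ∀ (col_phase_subject : List (String × String)), Dom_group_mark_columns_single_dept_py col_phase_subject → Spec_group_mark_columns_single_dept_py col_phase_subject (group_mark_columns_single_dept_py col_phase_subject)

-- ===== LEMMAS AND PROOFS =====

-- canonical grouping by runs of equal phase names (proof-only helper)
def runs : List (String × String) → List (String × List String)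
  | [] => []
  | (pn, sn) :: rest =>
    (pn, sn :: (rest.takeWhile (fun t => t.1 == pn)).map Prod.snd) ::
      runs (rest.dropWhile (fun t => t.1 == pn))
termination_by l => l.length
decreasing_by
  simp only [List.length_cons]
  exact Nat.lt_succ_of_le (List.length_dropWhile_le _ _)

theorem aCollect_spec (l : List (String × String)) (pn : String) :
    ∀ (rest : List (String × String)) (subs : List String) (i fuel : Nat),
      l.drop i = rest → rest.length ≤ fuel →
      aCollect fuel l pn subs i =
        (subs ++ (rest.takeWhile (fun t => t.1 == pn)).map Prod.snd,
         i + (rest.takeWhile (fun t => t.1 == pn)).length) := by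
  intro rest
  induction rest with
  | nil =>
    intro subs i fuel hd _
    have hle : l.length ≤ i := List.drop_eq_nil_iff.mp hd
    cases fuel with
    | zero => simp [aCollect]
    | succ f => simp [aCollect, Nat.not_lt_of_le hle]
  | cons a rs ih =>
    intro subs i fuel hd hn
    obtain ⟨f, rfl⟩ : ∃ f, fuel = f + 1 := by
      cases fuel with
      | zero => simp at hn
      | succ f => exact ⟨f, rfl⟩
    have hi : i < l.length := by
      by_contra h
      rw [List.drop_eq_nil_of_le (by omega)] at hd; simp at hd
    have hgetE : l[i] = a := by
      have := List.drop_eq_getElem_cons (l := l) hi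
      rw [hd] at this
      injection this with h1 _; exact h1.symm
    have hget : l.getD i ("", "") = a := by
      simp [List.getD, List.getElem?_eq_getElem hi, hgetE]
    have hd' : l.drop (i + 1) = rs := by
      have := List.drop_eq_getElem_cons (l := l) hi
      rw [hd] at this
      injection this with _ h2; exact h2.symm
    show (if i < l.length && ((l.getD i ("", "")).1 == pn) then
        aCollect f l pn (subs ++ [(l.getD i ("", "")).2]) (i + 1)
      else (subs, i)) = _
    by_cases hpn : a.1 == pn
    · rw [if_pos (by simp [hgetE, hpn, hi])]
      rw [hget, ih (subs ++ [a.2]) (i + 1) f hd' (by simp at hn; omega)]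
      simp [List.takeWhile, hpn]
      omega
    · rw [if_neg (by
        simp only [List.getD, List.getElem?_eq_getElem hi, hgetE, Option.getD_some]
        simp [hpn])]
      simp [List.takeWhile, hpn]

lemma drop_length_takeWhile {α : Type} (p : α → Bool) (l : List α) :
    l.drop (l.takeWhile p).length = l.dropWhile p := by
  induction l with
  | nil => simp
  | cons a l ih => by_cases h : p a <;> simp [List.takeWhile, List.dropWhile, h, ih]

theorem aLoop_spec (l : List (String × String)) :
    ∀ (fuel : Nat) (rest : List (String × String)) (i : Nat), rest.length ≤ fuel →
      l.drop i = rest → aLoop fuel l i = runs rest := by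
  intro fuel
  induction fuel with
  | zero =>
    intro rest i hn hd
    have : rest = [] := by cases rest <;> simp_all
    subst this
    simp [aLoop, runs]
  | succ n ih =>
    intro rest i hn hd
    match rest with
    | [] =>
      have hle : l.length ≤ i := List.drop_eq_nil_iff.mp hd
      simp [aLoop, Nat.not_lt_of_le hle, runs]
    | (pn, sn) :: rest =>
      have hi : i < l.length := by
        by_contra h
        rw [List.drop_eq_nil_of_le (by omega)] at hd; simp at hd
      have hgetE : l[i] = (pn, sn) := by
        have := List.drop_eq_getElem_cons (l := l) hi
        rw [hd] at this
        injection this with h1 _; exact h1.symm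
      have hget : l.getD i ("", "") = (pn, sn) := by
        simp [List.getD, List.getElem?_eq_getElem hi, hgetE]
      have hd' : l.drop (i + 1) = rest := by
        have := List.drop_eq_getElem_cons (l := l) hi
        rw [hd] at this
        injection this with _ h2; exact h2.symm
      show (if i < l.length then
          let c := l.getD i ("", "")
          let r := aCollect l.length l c.1 [c.2] (i + 1)
          (c.1, r.1) :: aLoop n l r.2
        else []) = _
      rw [if_pos hi]
      simp only [hget]
      rw [aCollect_spec l pn rest [sn] (i + 1) l.length hd'
        (by have := List.length_drop (l := l) (i := i + 1); rw [hd'] at this; omega)]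
      have hdw : l.drop (i + 1 + (rest.takeWhile (fun t => t.1 == pn)).length)
          = rest.dropWhile (fun t => t.1 == pn) := by
        have h2 : l.drop ((i + 1) + (rest.takeWhile (fun t => t.1 == pn)).length)
            = (l.drop (i + 1)).drop (rest.takeWhile (fun t => t.1 == pn)).length := by
          rw [List.drop_drop]
        rw [h2, hd', drop_length_takeWhile]
      rw [ih (rest.dropWhile (fun t => t.1 == pn)) _
        (le_trans (List.length_dropWhile_le _ _) (by simp at hn; omega)) hdw]
      simp [runs]

lemma bStep_runs (x : String × String) (xs : List (String × String)) :
    bStep x (runs xs) = runs (x :: xs) := by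
  obtain ⟨pn, sn⟩ := x
  match xs with
  | [] => simp [runs, bStep]
  | (qn, tn) :: ys =>
    by_cases h : qn = pn
    · subst h
      simp [runs, bStep]
    · have hb : (qn == pn) = false := beq_eq_false_iff_ne.mpr h
      simp [runs, bStep, hb]

lemma foldr_bStep_eq_runs (l : List (String × String)) :
    l.foldr bStep [] = runs l := by
  induction l with
  | nil => simp [runs]
  | cons x xs ih => simp [List.foldr, ih, bStep_runs]

-- ===== VERDICT (by name: the statement is the Claim_ definition above) =====
theorem group_mark_columns_single_dept_py_spec : Claim_equal_group_mark_columns_single_dept_py := by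
  intro l _
  unfold Spec_group_mark_columns_single_dept_py group_mark_columns_single_dept_py
    group_mark_columns_single_dept_py_alt
  rw [foldr_bStep_eq_runs]
  exact aLoop_spec l l.length l 0 le_rfl (by simp)
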